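-- pv_equiv track=rewrite | github.com/bphu/todo-maker | backend/app/tasks.py | _group_todos_by_owner
-- ===== SOURCE A (Python) =====
-- from typing import Any
--
-- def _group_todos_by_owner(todos: list[dict[str, Any]]) -> str:
--     grouped: dict[str, list[dict[str, Any]]] = {}
--     for todo in todos:
--         owner = str(todo.get("owner", "UNKNOWN"))
--         grouped.setdefault(owner, []).append(todo)
--
--     lines: list[str] = []
--     for owner in sorted(grouped.keys()):
--         lines.append(owner)
--         for item in grouped[owner]:
--             due = item.get("due")
--             due_suffix = f" (due: {due})" if due else ""
--             lines.append(f"- {item.get('text', '')}{due_suffix}")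
--         lines.append("")
--     return "\n".join(lines).strip() + "\n"
-- ===== SOURCE B (Python) =====
-- def _group_todos_by_owner(todos):
--     def owner_of(todo):
--         return str(todo.get("owner", "UNKNOWN"))
--
--     def line_of(todo):
--         due = todo.get("due")
--         tail = f" (due: {due})" if due else ""
--         return f"- {todo.get('text', '')}{tail}"
--
--     owners = sorted({owner_of(t) for t in todos})
--     lines = []
--     for owner in owners:
--         block = [owner]
--         for t in todos:
--             if owner_of(t) == owner:
--                 block.append(line_of(t))
--         block.append("")
--         lines.extend(block)
--     return "\n".join(lines).strip() + "\n"
-- ===== Notes on version B (the rewrite author's own statement) =====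
-- stated objective: alternative
-- what changed: B keeps no grouping dict: it sorts the distinct owner strings once and then, for each owner, selects that owner's todos by a filtering pass over the input list, emitting each block directly.
import Mathlib
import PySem

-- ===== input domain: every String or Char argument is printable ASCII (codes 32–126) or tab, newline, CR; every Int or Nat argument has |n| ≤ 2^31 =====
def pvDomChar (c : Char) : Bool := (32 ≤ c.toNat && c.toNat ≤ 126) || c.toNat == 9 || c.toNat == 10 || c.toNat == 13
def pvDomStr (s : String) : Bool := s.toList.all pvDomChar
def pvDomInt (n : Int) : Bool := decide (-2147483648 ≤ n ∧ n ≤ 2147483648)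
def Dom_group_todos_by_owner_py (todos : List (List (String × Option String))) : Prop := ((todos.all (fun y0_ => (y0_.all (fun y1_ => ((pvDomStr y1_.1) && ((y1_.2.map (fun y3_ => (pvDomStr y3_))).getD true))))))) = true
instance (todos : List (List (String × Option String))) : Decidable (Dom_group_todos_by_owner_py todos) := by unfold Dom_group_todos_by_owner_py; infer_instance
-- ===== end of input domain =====

-- B replaces A's grouping dict by a sorted list of distinct owners with one filtering pass per owner (alternative decomposition, same cost).
-- Shared helpers: a todo is a dict str -> Optional[str]; these are the field reads both Pythons perform.
-- todo.get(k) (first-match association-list lookup, Python dict semantics)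
def pvGet (t : List (String × Option String)) (k : String) : Option (Option String) :=
  (PySem.Dict.mk t).get? k

-- str(todo.get("owner", "UNKNOWN")): missing key -> "UNKNOWN", value None -> "None"
def pvOwner (t : List (String × Option String)) : String :=
  match pvGet t "owner" with
  | none => "UNKNOWN"
  | some none => "None"
  | some (some s) => s

-- f"- {item.get('text', '')}{due_suffix}" (value None prints as "None"; due falsy iff missing, None or "")
def pvLine (t : List (String × Option String)) : String :=
  let text := match pvGet t "text" with
    | none => ""
    | some none => "None"
    | some (some s) => s
  let tail := match pvGet t "due" with
    | some (some s) => if s == "" then "" else " (due: " ++ s ++ ")"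
    | _ => ""
  "- " ++ text ++ tail

-- ===== PORT A =====
-- grouped.setdefault(owner, []).append(todo) is ported as modify owner [] (append todo)
def pvGrouped (todos : List (List (String × Option String))) :
    PySem.Dict String (List (List (String × Option String))) :=
  todos.foldl (fun d todo => d.modify (pvOwner todo) [] (· ++ [todo])) PySem.Dict.empty

def group_todos_by_owner_py (todos : List (List (String × Option String))) : String :=
  PySem.Str.strip (PySem.Str.join "\n"
    ((PySem.List.sorted (pvGrouped todos).keys (fun k => k) false).foldl
      (fun lines owner =>
        (((pvGrouped todos).getD owner []).foldl
          (fun ls item => ls ++ [pvLine item]) (lines ++ [owner])) ++ [""])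
      [])) ++ "\n"

-- ===== PORT B =====
def group_todos_by_owner_py_alt (todos : List (List (String × Option String))) : String :=
  PySem.Str.strip (PySem.Str.join "\n"
    ((PySem.List.sorted (PySem.Set.ofList (todos.map pvOwner)) (fun k => k) false).foldl
      (fun lines owner =>
        lines ++
          ((todos.foldl
              (fun blk t => if pvOwner t == owner then blk ++ [pvLine t] else blk)
              [owner]) ++ [""]))
      [])) ++ "\n"

-- ===== PRECONDITION & SPEC =====
def Spec_group_todos_by_owner_py (todos : List (List (String × Option String))) (out : String) : Prop := out = group_todos_by_owner_py_alt todos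
instance (todos : List (List (String × Option String))) (out : String) : Decidable (Spec_group_todos_by_owner_py todos out) := by unfold Spec_group_todos_by_owner_py; infer_instance

-- ===== CLAIM (what is proved, stated in full; the proofs are below) =====
def Claim_equal_group_todos_by_owner_py : Prop := ∀ (todos : List (List (String × Option String))), Dom_group_todos_by_owner_py todos → Spec_group_todos_by_owner_py todos (group_todos_by_owner_py todos)

-- ===== LEMMAS AND PROOFS =====

-- A's dict keys, in insertion order, are the distinct owner strings in first-occurrence order.
lemma keys_grouped (todos : List (List (String × Option String))) :
    (pvGrouped todos).keys = PySem.Set.ofList (todos.map pvOwner) := by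
  unfold pvGrouped
  rw [PySem.Dict.keys_foldl_modify_key]
  simp [PySem.Set.update, PySem.Set.ofList_eq_foldl, PySem.Dict.keys_empty]

-- A's group at key o is exactly the todos whose owner string is o, in order.
lemma getD_grouped (todos : List (List (String × Option String))) (o : String) :
    (pvGrouped todos).getD o [] = todos.filter (fun t => pvOwner t == o) := by
  unfold pvGrouped
  have h := PySem.Dict.getD_foldl_modify_append
    (l := todos.map (fun t => (pvOwner t, t)))
    (d := (PySem.Dict.empty : PySem.Dict String (List (List (String × Option String)))))
    (c := o)
  rw [List.foldl_map] at h
  simpa [List.filter_map, Function.comp_def] using h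

lemma lines_eq (todos : List (List (String × Option String))) :
    ((PySem.List.sorted (pvGrouped todos).keys (fun k => k) false).foldl
      (fun lines owner =>
        (((pvGrouped todos).getD owner []).foldl
          (fun ls item => ls ++ [pvLine item]) (lines ++ [owner])) ++ [""])
      [])
    = ((PySem.List.sorted (PySem.Set.ofList (todos.map pvOwner)) (fun k => k) false).foldl
      (fun lines owner =>
        lines ++
          ((todos.foldl
              (fun blk t => if pvOwner t == owner then blk ++ [pvLine t] else blk)
              [owner]) ++ [""]))
      []) := by
  rw [keys_grouped]
  apply PySem.List.foldl_congr_mem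
  intro acc o _
  rw [getD_grouped, PySem.List.foldl_append_singleton_eq_map,
      PySem.List.foldl_append_if]
  simp [List.append_assoc]

-- ===== VERDICT (by name: the statement is the Claim_ definition above) =====
theorem group_todos_by_owner_py_spec : Claim_equal_group_todos_by_owner_py := by
  intro todos _
  unfold Spec_group_todos_by_owner_py group_todos_by_owner_py group_todos_by_owner_py_alt
  rw [lines_eq]
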